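-- pv_equiv track=rewrite | github.com/esteemedtogami/Computer-Network-and-Security | 16-Bit XOR Hash/16_bit_xor_hash.py | hashify
-- ===== SOURCE A (Python) =====
-- import math
--
-- def hashify(my_string):
--     my_list = []
--
--     # Separate M into 16-bit blocks, padding the final block if len < 16
--     for i in range(math.ceil(len(my_string)/16)):
--         my_append = my_string[(i*16):((i+1)*16)]
--         if i == (math.ceil(len(my_string)/16)) - 1:
--             if len(my_append) < 16:
--                 for j in range(16-len(my_append)):
--                     my_append += "1"
--         my_list.append(my_append)
--
--     my_hash = my_list[0]
--
--     # Perform manual XOR on each character for each block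
--     for i in range(1, len(my_list)):
--         temp_list = []
--         for j in range(16):
--             if my_hash[j] == my_list[i][j]:
--                 temp_list.append("0")
--             else:
--                 temp_list.append("1")
--         my_hash = "".join(temp_list)
--
--     return my_hash
-- ===== SOURCE B (Python) =====
-- def hashify(my_string):
--     # 16-char blocks, final block right-padded with "1"
--     blocks = [my_string[i:i + 16] for i in range(0, len(my_string), 16)]
--     if blocks:
--         blocks[-1] = blocks[-1].ljust(16, "1")
--     # fold each of the 16 columns (column-major via zip) instead of XOR-ing row by row
--     out = []
--     for col in zip(*blocks):
--         acc = col[0]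
--         for ch in col[1:]:
--             acc = "0" if acc == ch else "1"
--         out.append(acc)
--     return "".join(out)
-- ===== Notes on version B (the rewrite author's own statement) =====
-- stated objective: alternative
-- what changed: Replaces A's index-driven row-by-row XOR (rebuilding the 16-char hash string for each block) by a column-major pass: build the blocks with slicing/ljust, transpose them with zip(*blocks), and fold each of the 16 columns independently to one output character.
import Mathlib
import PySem

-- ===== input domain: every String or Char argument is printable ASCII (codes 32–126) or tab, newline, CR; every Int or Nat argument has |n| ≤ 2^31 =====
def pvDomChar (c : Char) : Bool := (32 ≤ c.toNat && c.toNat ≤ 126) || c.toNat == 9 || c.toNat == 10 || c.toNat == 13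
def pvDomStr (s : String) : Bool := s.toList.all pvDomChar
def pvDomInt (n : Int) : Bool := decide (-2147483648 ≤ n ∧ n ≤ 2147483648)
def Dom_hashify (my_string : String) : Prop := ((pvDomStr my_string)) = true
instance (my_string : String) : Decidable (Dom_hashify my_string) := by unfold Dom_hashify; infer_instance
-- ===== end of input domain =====

-- B folds the 16 columns of the transposed block list instead of XOR-ing the blocks row by row; alternative decomposition, same cost.


-- ===== PORT A =====
def hashify (my_string : String) : String :=
  let cs := my_string.toList
  -- math.ceil(len(my_string)/16): (n+15)/16 is exact for a Nat length
  let nb := (cs.length + 15) / 16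
  let my_list := (List.range nb).foldl (fun acc (i : Nat) =>
      let app := PySem.List.slice cs (some ((i : Int) * 16)) (some (((i : Int) + 1) * 16))
      let app := if i = nb - 1 then
          (if app.length < 16 then
            (List.range (16 - app.length)).foldl (fun a _ => a ++ ['1']) app
          else app)
        else app
      acc ++ [app]) ([] : List (List Char))
  let h0 := PySem.List.pyGetD my_list 0 []   -- my_list[0]: IndexError on the empty string, excluded by Pre_
  let hash := (PySem.List.pyRange 1 (PySem.List.len my_list)).foldl (fun h i =>
      (PySem.List.pyRange 0 16).foldl (fun t j =>
        t ++ [if PySem.List.pyGetD h j ' ' =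
               PySem.List.pyGetD (PySem.List.pyGetD my_list i []) j ' '
              then '0' else '1']) []) h0
  String.ofList hash

-- ===== PORT B =====
-- b.ljust(16, "1")
def pvLjust16 (b : List Char) : List Char := b ++ List.replicate (16 - b.length) '1'

def hashify_alt (my_string : String) : String :=
  let cs := my_string.toList
  let blocks := (PySem.List.pyRange 0 cs.length 16).map
      (fun i => PySem.List.slice cs (some i) (some (i + 16)))
  let blocks := if blocks.isEmpty then blocks
    else blocks.dropLast ++ [pvLjust16 (PySem.List.pyGetD blocks (-1) [])]  -- blocks[-1] = blocks[-1].ljust(16, "1")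
  -- zip(*blocks): the 16 columns of the (all length-16) blocks; no columns when there are no blocks
  let cols := if blocks.isEmpty then ([] : List (List Char))
    else (List.range 16).map (fun (j : Nat) => blocks.map (fun b => PySem.List.pyGetD b (j : Int) ' '))
  let out := cols.map (fun col =>
      (PySem.List.slice col (some 1) none).foldl     -- col[1:]
        (fun acc c => if acc = c then '0' else '1')
        (PySem.List.pyGetD col 0 ' '))               -- col[0]
  String.ofList out

-- ===== PRECONDITION & SPEC =====
-- Pre_ excludes exactly the empty string, on which A raises IndexError (my_list[0] of an empty list).
def Pre_hashify (my_string : String) : Prop := my_string ≠ ""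
instance (my_string : String) : Decidable (Pre_hashify my_string) := by unfold Pre_hashify; infer_instance
def pvWitness_hashify : String := "abc"

def Spec_hashify (my_string : String) (out : String) : Prop := out = hashify_alt my_string
instance (my_string : String) (out : String) : Decidable (Spec_hashify my_string out) := by unfold Spec_hashify; infer_instance

-- ===== CLAIM (what is proved, stated in full; the proofs are below) =====
def Claim_equal_hashify : Prop := ∀ (my_string : String), Dom_hashify my_string → Pre_hashify my_string → Spec_hashify my_string (hashify my_string)

-- ===== LEMMAS AND PROOFS =====

-- proof-only helpers: the common normal form of both ports
-- pvG cs i = the i-th raw 16-char block my_string[i*16:(i+1)*16]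
def pvG (cs : List Char) (i : Nat) : List Char := List.take 16 (List.drop (i * 16) cs)

-- the block list both ports build: all raw blocks but the last, then the last padded to 16
def pvRows (cs : List Char) : List (List Char) :=
  (List.range ((cs.length + 15) / 16 - 1)).map (pvG cs) ++ [pvLjust16 (pvG cs ((cs.length + 15) / 16 - 1))]

-- the shared normal form: 16 independent column folds over the rows
def pvNF (cs : List Char) : List Char :=
  (List.range 16).map (fun j =>
    List.foldl (fun a r => if a = r.getD j ' ' then '0' else '1')
      (((pvRows cs).getD 0 []).getD j ' ') ((pvRows cs).drop 1))

lemma map_range_getD (h : List Char) (hl : h.length = 16) :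
    (List.range 16).map (fun j => h.getD j ' ') = h := by
  apply List.ext_getElem (by simp [hl])
  intro i h1 h2
  simp only [List.getElem_map, List.getElem_range]
  rw [List.getD_eq_getElem h ' ' h2]

lemma pyGetD_concat_neg_one {a : Type} (l : List a) (x d : a) :
    PySem.List.pyGetD (l ++ [x]) (-1) d = x := by
  unfold PySem.List.pyGetD PySem.List.pyGet? PySem.List.pyIdx?
  have h1 : ¬ (0:Int) ≤ -1 := by norm_num
  have h2 : -((l ++ [x]).length : Int) ≤ -1 := by simp
  simp only [h1, if_false, h2, if_pos]
  simp

lemma slice_eq_pvG (cs : List Char) (i : Nat) :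
    PySem.List.slice cs (some ((i : Int) * 16)) (some (((i : Int) + 1) * 16)) = pvG cs i := by
  have e1 : ((i : Int) * 16) = ((i * 16 : Nat) : Int) := by push_cast; ring
  have e2 : (((i : Int) + 1) * 16) = ((i * 16 + 16 : Nat) : Int) := by push_cast; ring
  rw [e1, e2, PySem.List.slice_natCast]
  unfold pvG
  congr 1
  omega

lemma trans_fold (rs : List (List Char)) : forall (h : List Char), h.length = 16 ->
    List.foldl (fun h r => (List.range 16).map
        (fun k => if h.getD k ' ' = r.getD k ' ' then '0' else '1')) h rs
  = (List.range 16).map (fun j =>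
      List.foldl (fun a r => if a = r.getD j ' ' then '0' else '1') (h.getD j ' ') rs) := by
  induction rs with
  | nil => intro h hl; simp only [List.foldl_nil]; exact (map_range_getD h hl).symm
  | cons r rs ih =>
    intro h hl
    rw [List.foldl_cons, ih _ (by simp)]
    refine List.map_congr_left fun j hj => ?_
    rw [PySem.List.getD_map_range _ _ _ _ (List.mem_range.mp hj), List.foldl_cons]

lemma rows_ne_nil (cs : List Char) : pvRows cs ≠ [] := by
  simp [pvRows]

lemma rows_head_len (cs : List Char) (hne : cs ≠ []) :
    ((pvRows cs).getD 0 []).length = 16 := by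
  have hn : 0 < cs.length := List.length_pos_iff.mpr hne
  unfold pvRows
  rcases Nat.eq_zero_or_pos ((cs.length + 15) / 16 - 1) with h0 | hpos
  · rw [h0]
    simp only [List.range_zero, List.map_nil, List.nil_append, List.getD_cons_zero]
    have : (pvG cs 0).length ≤ 16 := by simp [pvG]
    simp [pvLjust16]
    omega
  · have h17 : 17 ≤ cs.length := by omega
    rw [List.getD_append _ _ _ _ (by simp [hpos])]
    rw [List.getD_eq_getElem _ _ (by simp [hpos])]
    simp [pvG]
    omega

lemma ljust_if (b : List Char) :
    (if b.length < 16 then b ++ List.replicate (16 - b.length) '1' else b) = pvLjust16 b := by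
  unfold pvLjust16
  split_ifs with h
  · rfl
  · simp [Nat.sub_eq_zero_of_le (le_of_not_gt h)]

lemma pyRangeSixteen : PySem.List.pyRange 0 16 = (List.range 16).map (fun (k : Nat) => (k : Int)) := by
  rw [show (16:Int) = ((16:Nat):Int) by norm_num, PySem.List.pyRange_zero_natCast]

lemma rows_eq (cs : List Char) (h1 : 1 ≤ (cs.length + 15) / 16) :
    (List.range ((cs.length + 15) / 16)).map (fun i =>
      if i = (cs.length + 15) / 16 - 1 then pvLjust16 (pvG cs i) else pvG cs i) = pvRows cs := by
  unfold pvRows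
  obtain ⟨m, hm⟩ : ∃ m, (cs.length + 15) / 16 = m + 1 := ⟨(cs.length + 15) / 16 - 1, by omega⟩
  rw [hm, show m + 1 - 1 = m by omega, List.range_succ, List.map_append]
  congr 1
  · refine List.map_congr_left fun i hi => ?_
    rw [if_neg (by have := List.mem_range.mp hi; omega)]
  · simp

lemma outer_eq (rows : List (List Char)) (init : List Char) :
    (PySem.List.pyRange 1 (PySem.List.len rows)).foldl (fun h i => (List.range 16).map
      (fun k => if h.getD k ' ' = (PySem.List.pyGetD rows i []).getD k ' ' then '0' else '1')) init
  = (rows.drop 1).foldl (fun h r => (List.range 16).map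
      (fun k => if h.getD k ' ' = r.getD k ' ' then '0' else '1')) init := by
  have h := PySem.List.foldl_pyRange_pyGetD rows ([] : List Char)
    (fun h r => (List.range 16).map (fun k => if h.getD k ' ' = r.getD k ' ' then '0' else '1')) init
    (a := 1) (by norm_num)
  simpa using h

lemma hashify_eq (cs : List Char) (hne : cs ≠ []) :
    hashify (String.ofList cs) = String.ofList (pvNF cs) := by
  have hn : 0 < cs.length := List.length_pos_iff.mpr hne
  have hnb1 : 1 ≤ (cs.length + 15) / 16 := by omega
  unfold hashify
  simp only [String.toList_ofList, slice_eq_pvG, PySem.List.foldl_append_singleton_eq_map,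
    List.nil_append, List.map_const', List.length_range, ljust_if, rows_eq cs hnb1,
    pyRangeSixteen, List.map_map, Function.comp_def, PySem.List.pyGetD_natCast, PySem.List.pyGetD_ofNat']
  rw [outer_eq, trans_fold _ _ (rows_head_len cs hne)]
  rfl

lemma blocks0_eq (cs : List Char) (hne : cs ≠ []) :
    (PySem.List.pyRange 0 cs.length 16).map (fun i => PySem.List.slice cs (some i) (some (i + 16)))
  = (List.range ((cs.length + 15) / 16)).map (pvG cs) := by
  have hn : 0 < cs.length := List.length_pos_iff.mpr hne
  rw [PySem.List.pyRange_of_pos 0 cs.length (by norm_num)]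
  rw [if_pos (by exact_mod_cast hn), List.map_map]
  rw [show (((cs.length : Int) - 0 + 16 - 1) / 16).toNat = (cs.length + 15) / 16 by omega]
  refine List.map_congr_left fun k hk => ?_
  show PySem.List.slice cs (some (0 + 16 * (k : Int))) (some (0 + 16 * (k : Int) + 16)) = pvG cs k
  rw [show (0 + 16 * (k : Int)) = ((k * 16 : Nat) : Int) by push_cast; ring,
      show (((k * 16 : Nat) : Int) + 16) = ((k * 16 + 16 : Nat) : Int) by push_cast; ring,
      PySem.List.slice_natCast]
  unfold pvG
  congr 1
  omega

lemma blocks_eq (cs : List Char) (hnb1 : 1 ≤ (cs.length + 15) / 16) :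
    (if (List.map (pvG cs) (List.range ((cs.length + 15) / 16))).isEmpty = true then
        List.map (pvG cs) (List.range ((cs.length + 15) / 16))
      else
        (List.map (pvG cs) (List.range ((cs.length + 15) / 16))).dropLast ++
          [pvLjust16 (PySem.List.pyGetD (List.map (pvG cs) (List.range ((cs.length + 15) / 16))) (-1) [])])
  = pvRows cs := by
  obtain ⟨m, hm⟩ : ∃ m, (cs.length + 15) / 16 = m + 1 := ⟨(cs.length + 15) / 16 - 1, by omega⟩
  rw [hm, List.range_succ, List.map_append]
  rw [if_neg (by simp)]
  simp only [List.map_cons, List.map_nil]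
  rw [List.dropLast_concat, pyGetD_concat_neg_one]
  unfold pvRows
  rw [hm, show m + 1 - 1 = m by omega]

lemma hashify_alt_eq (cs : List Char) (hne : cs ≠ []) :
    hashify_alt (String.ofList cs) = String.ofList (pvNF cs) := by
  have hn : 0 < cs.length := List.length_pos_iff.mpr hne
  have hnb1 : 1 ≤ (cs.length + 15) / 16 := by omega
  unfold hashify_alt
  simp only [String.toList_ofList, blocks0_eq cs hne, blocks_eq cs hnb1]
  rw [if_neg (by simp [pvRows]), List.map_map]
  obtain ⟨r0, rt, hrows⟩ := List.exists_cons_of_ne_nil (rows_ne_nil cs)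
  unfold pvNF
  rw [hrows]
  simp only [List.map_cons, Function.comp_def, List.getD_cons_zero, List.drop_succ_cons, List.drop_zero]
  refine congrArg String.ofList (List.map_congr_left fun j hj => ?_)
  rw [PySem.List.slice_from _ (by norm_num : (0:Int) ≤ 1)]
  simp only [Int.toNat_one, List.drop_succ_cons, List.drop_zero, List.foldl_map,
    PySem.List.pyGetD_natCast, PySem.List.pyGetD_ofNat', List.getD_cons_zero]

theorem main_eq (cs : List Char) (hne : cs ≠ []) :
    hashify (String.ofList cs) = hashify_alt (String.ofList cs) := by
  rw [hashify_eq cs hne, hashify_alt_eq cs hne]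

-- ===== VERDICT (by name: the statement is the Claim_ definition above) =====
theorem hashify_spec : Claim_equal_hashify := by
  intro s _ hpre
  unfold Spec_hashify
  have : s = String.ofList s.toList := String.ofList_toList.symm
  rw [this]
  apply main_eq
  intro h
  exact hpre (by cases s; simpa using congrArg String.ofList h)
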